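-- pv_equiv track=rewrite | github.com/Ag3497120/verantyx-v6 | synth_results/4093f84a.py | transform
-- ===== SOURCE A (Python) =====
-- def transform(grid):
--     rows = len(grid)
--     cols = len(grid[0])
--     result = [[0]*cols for _ in range(rows)]
--
--     # Find the solid block of 5s
--     five_rows = set()
--     five_cols = set()
--     for r in range(rows):
--         for c in range(cols):
--             if grid[r][c] == 5:
--                 five_rows.add(r)
--                 five_cols.add(c)
--
--     if not five_rows:
--         return [list(row) for row in grid]
--
--     r1, r2 = min(five_rows), max(five_rows)
--     c1, c2 = min(five_cols), max(five_cols)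
--
--     # Copy 5-block as-is
--     for r in range(r1, r2+1):
--         for c in range(c1, c2+1):
--             result[r][c] = 5
--
--     def is_marker(v):
--         return v != 0 and v != 5
--
--     # For each row in block range: count markers to left/right
--     for r in range(r1, r2+1):
--         left_count = sum(1 for c in range(0, c1) if is_marker(grid[r][c]))
--         right_count = sum(1 for c in range(c2+1, cols) if is_marker(grid[r][c]))
--         for i in range(left_count):
--             c = c1 - 1 - i
--             if 0 <= c < cols:
--                 result[r][c] = 5
--         for i in range(right_count):
--             c = c2 + 1 + i
--             if 0 <= c < cols:
--                 result[r][c] = 5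
--
--     # For each col in block range: count markers above/below
--     for c in range(c1, c2+1):
--         top_count = sum(1 for r in range(0, r1) if is_marker(grid[r][c]))
--         bot_count = sum(1 for r in range(r2+1, rows) if is_marker(grid[r][c]))
--         for i in range(top_count):
--             r = r1 - 1 - i
--             if 0 <= r < rows:
--                 result[r][c] = 5
--         for i in range(bot_count):
--             r = r2 + 1 + i
--             if 0 <= r < rows:
--                 result[r][c] = 5
--
--     return result
-- ===== SOURCE B (Python) =====
-- def transform(grid):
--     rows = len(grid)
--     cols = len(grid[0])
--
--     # all 5-cells in scan order
--     fives = [(r, c) for r in range(rows) for c in range(cols) if grid[r][c] == 5]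
--     if not fives:
--         return [list(row) for row in grid]
--
--     r1 = min(r for r, _ in fives)
--     r2 = max(r for r, _ in fives)
--     c1 = min(c for _, c in fives)
--     c2 = max(c for _, c in fives)
--
--     def is_marker(v):
--         return v != 0 and v != 5
--
--     # marker counts per row (left/right of the box) and per column (above/below)
--     left = [sum(1 for cc in range(0, c1) if is_marker(grid[r][cc])) for r in range(rows)]
--     right = [sum(1 for cc in range(c2 + 1, cols) if is_marker(grid[r][cc])) for r in range(rows)]
--     top = [sum(1 for rr in range(0, r1) if is_marker(grid[rr][c])) for c in range(cols)]
--     bot = [sum(1 for rr in range(r2 + 1, rows) if is_marker(grid[rr][c])) for c in range(cols)]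
--
--     def cell(r, c):
--         if r1 <= r and r <= r2 and c1 <= c and c <= c2:
--             return 5
--         if r1 <= r and r <= r2 and c < c1 and c1 - left[r] <= c:
--             return 5
--         if r1 <= r and r <= r2 and c2 < c and c <= c2 + right[r]:
--             return 5
--         if c1 <= c and c <= c2 and r < r1 and r1 - top[c] <= r:
--             return 5
--         if c1 <= c and c <= c2 and r2 < r and r <= r2 + bot[c]:
--             return 5
--         return 0
--
--     return [[cell(r, c) for c in range(cols)] for r in range(rows)]
-- ===== Notes on version B (the rewrite author's own statement) =====
-- stated objective: alternative
-- what changed: B replaces A's mutable result grid and four in-place run-painting passes (left/right per block row, top/bottom per block column) by precomputed marker-count arrays for every row and column plus a pure per-cell formula that decides each output cell directly from the bounding box and the counts.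
import Mathlib
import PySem

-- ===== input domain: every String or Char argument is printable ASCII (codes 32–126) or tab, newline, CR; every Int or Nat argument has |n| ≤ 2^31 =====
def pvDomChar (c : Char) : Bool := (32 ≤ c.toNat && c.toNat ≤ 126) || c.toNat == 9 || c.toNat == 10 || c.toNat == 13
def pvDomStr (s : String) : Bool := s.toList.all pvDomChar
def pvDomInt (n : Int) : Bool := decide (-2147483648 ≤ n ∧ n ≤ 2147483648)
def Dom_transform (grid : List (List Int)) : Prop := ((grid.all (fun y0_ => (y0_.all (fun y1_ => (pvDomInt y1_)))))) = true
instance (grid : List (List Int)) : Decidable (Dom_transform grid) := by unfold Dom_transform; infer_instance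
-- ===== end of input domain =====

-- B replaces A's four in-place run-painting passes over a mutable result by marker-count
-- arrays built with comprehensions and a pure per-cell formula; objective: alternative.

-- shared helpers (both Pythons contain the same sub-expressions: grid[r][c], is_marker, the 0/1 marker sums)
def pvGet (grid : List (List Int)) (r c : Int) : Int :=
  PySem.List.pyGetD (PySem.List.pyGetD grid r []) c 0

def pvMarker (v : Int) : Bool := v != 0 && v != 5

-- sum(1 for c in range(a, b) if is_marker(grid[r][c]))
def pvRowCnt (grid : List (List Int)) (r a b : Int) : Int :=
  (PySem.List.pyRange a b 1).foldl (fun acc c => if pvMarker (pvGet grid r c) then acc + 1 else acc) 0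

-- sum(1 for r in range(a, b) if is_marker(grid[r][c]))
def pvColCnt (grid : List (List Int)) (c a b : Int) : Int :=
  (PySem.List.pyRange a b 1).foldl (fun acc r => if pvMarker (pvGet grid r c) then acc + 1 else acc) 0

-- ===== PORT A =====
-- result[r][c] = 5 (valid indices throughout A's loops)
def pvSet2 (m : List (List Int)) (r c : Int) : List (List Int) :=
  PySem.List.pySetD m r (PySem.List.pySetD (PySem.List.pyGetD m r []) c 5)

def transform (grid : List (List Int)) : List (List Int) :=
  let rows : Int := grid.length
  let cols : Int := (PySem.List.pyGetD grid 0 ([] : List Int)).length   -- len(grid[0]); grid ≠ [] by Pre_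
  let result0 : List (List Int) :=
    (PySem.List.pyRange 0 rows 1).map (fun _ => (PySem.List.pyRange 0 cols 1).map (fun _ => (0 : Int)))
  let fs : PySem.Set Int × PySem.Set Int :=
    (PySem.List.pyRange 0 rows 1).foldl (fun p r =>
      (PySem.List.pyRange 0 cols 1).foldl (fun p c =>
        if pvGet grid r c == 5 then (PySem.Set.add p.1 r, PySem.Set.add p.2 c) else p) p)
      (PySem.Set.empty, PySem.Set.empty)
  if fs.1 = [] then grid.map (fun row => row) else
  let r1 : Int := (PySem.List.min? fs.1 (fun x => x)).getD 0
  let r2 : Int := (PySem.List.max? fs.1 (fun x => x)).getD 0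
  let c1 : Int := (PySem.List.min? fs.2 (fun x => x)).getD 0
  let c2 : Int := (PySem.List.max? fs.2 (fun x => x)).getD 0
  let res1 := (PySem.List.pyRange r1 (r2 + 1) 1).foldl (fun m r =>
      (PySem.List.pyRange c1 (c2 + 1) 1).foldl (fun m c => pvSet2 m r c) m) result0
  let res2 := (PySem.List.pyRange r1 (r2 + 1) 1).foldl (fun m r =>
      let lc := pvRowCnt grid r 0 c1
      let rc := pvRowCnt grid r (c2 + 1) cols
      let m1 := (PySem.List.pyRange 0 lc 1).foldl (fun m i =>
          if 0 ≤ c1 - 1 - i ∧ c1 - 1 - i < cols then pvSet2 m r (c1 - 1 - i) else m) m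
      (PySem.List.pyRange 0 rc 1).foldl (fun m i =>
          if 0 ≤ c2 + 1 + i ∧ c2 + 1 + i < cols then pvSet2 m r (c2 + 1 + i) else m) m1) res1
  let res3 := (PySem.List.pyRange c1 (c2 + 1) 1).foldl (fun m c =>
      let tc := pvColCnt grid c 0 r1
      let bc := pvColCnt grid c (r2 + 1) rows
      let m1 := (PySem.List.pyRange 0 tc 1).foldl (fun m i =>
          if 0 ≤ r1 - 1 - i ∧ r1 - 1 - i < rows then pvSet2 m (r1 - 1 - i) c else m) m
      (PySem.List.pyRange 0 bc 1).foldl (fun m i =>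
          if 0 ≤ r2 + 1 + i ∧ r2 + 1 + i < rows then pvSet2 m (r2 + 1 + i) c else m) m1) res2
  res3

-- ===== PORT B =====
def pvCell (r1 r2 c1 c2 : Int) (leftL rightL topL botL : List Int) (r c : Int) : Int :=
  if r1 ≤ r ∧ r ≤ r2 ∧ c1 ≤ c ∧ c ≤ c2 then 5
  else if r1 ≤ r ∧ r ≤ r2 ∧ c < c1 ∧ c1 - PySem.List.pyGetD leftL r 0 ≤ c then 5
  else if r1 ≤ r ∧ r ≤ r2 ∧ c2 < c ∧ c ≤ c2 + PySem.List.pyGetD rightL r 0 then 5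
  else if c1 ≤ c ∧ c ≤ c2 ∧ r < r1 ∧ r1 - PySem.List.pyGetD topL c 0 ≤ r then 5
  else if c1 ≤ c ∧ c ≤ c2 ∧ r2 < r ∧ r ≤ r2 + PySem.List.pyGetD botL c 0 then 5
  else 0

def transform_alt (grid : List (List Int)) : List (List Int) :=
  let rows : Int := grid.length
  let cols : Int := (PySem.List.pyGetD grid 0 ([] : List Int)).length
  let fives : List (Int × Int) :=
    (PySem.List.pyRange 0 rows 1).foldl (fun acc r =>
      (PySem.List.pyRange 0 cols 1).foldl (fun acc c =>
        if pvGet grid r c == 5 then acc ++ [(r, c)] else acc) acc) []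
  if fives = [] then grid.map (fun row => row) else
  let r1 : Int := (PySem.List.min? (fives.map (·.1)) (fun x => x)).getD 0
  let r2 : Int := (PySem.List.max? (fives.map (·.1)) (fun x => x)).getD 0
  let c1 : Int := (PySem.List.min? (fives.map (·.2)) (fun x => x)).getD 0
  let c2 : Int := (PySem.List.max? (fives.map (·.2)) (fun x => x)).getD 0
  let leftL := (PySem.List.pyRange 0 rows 1).map (fun r => pvRowCnt grid r 0 c1)
  let rightL := (PySem.List.pyRange 0 rows 1).map (fun r => pvRowCnt grid r (c2 + 1) cols)
  let topL := (PySem.List.pyRange 0 cols 1).map (fun c => pvColCnt grid c 0 r1)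
  let botL := (PySem.List.pyRange 0 cols 1).map (fun c => pvColCnt grid c (r2 + 1) rows)
  (PySem.List.pyRange 0 rows 1).map (fun r =>
    (PySem.List.pyRange 0 cols 1).map (fun c => pvCell r1 r2 c1 c2 leftL rightL topL botL r c))

-- ===== PRECONDITION & SPEC =====
-- Pre_ excludes exactly the inputs where Python A raises an IndexError: the empty grid
-- (len(grid[0])) and grids with a row shorter than the first row (grid[r][c] lookups).
def Pre_transform (grid : List (List Int)) : Prop :=
  grid ≠ [] ∧ ∀ row ∈ grid, (PySem.List.pyGetD grid 0 ([] : List Int)).length ≤ row.length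
instance (grid : List (List Int)) : Decidable (Pre_transform grid) := by unfold Pre_transform; infer_instance

def pvWitness_transform : List (List Int) := [[5, 1], [0, 0]]

def Spec_transform (grid : List (List Int)) (out : List (List Int)) : Prop := out = transform_alt grid
instance (grid : List (List Int)) (out : List (List Int)) : Decidable (Spec_transform grid out) := by unfold Spec_transform; infer_instance

-- ===== CLAIM (what is proved, stated in full; the proofs are below) =====
def Claim_equal_transform : Prop := ∀ (grid : List (List Int)), Dom_transform grid → Pre_transform grid → Spec_transform grid (transform grid)

-- ===== LEMMAS AND PROOFS =====

-- proof-side names for the ports' subterms (definitionally equal to the inline lets)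
def pvR (grid : List (List Int)) : Int := (grid.length : Int)
def pvCn (grid : List (List Int)) : Int := ((PySem.List.pyGetD grid 0 ([] : List Int)).length : Int)

def pvZero (grid : List (List Int)) : List (List Int) :=
  (PySem.List.pyRange 0 (pvR grid) 1).map (fun _ => (PySem.List.pyRange 0 (pvCn grid) 1).map (fun _ => (0 : Int)))

def pvFS (grid : List (List Int)) : PySem.Set Int × PySem.Set Int :=
  (PySem.List.pyRange 0 (pvR grid) 1).foldl (fun p r =>
    (PySem.List.pyRange 0 (pvCn grid) 1).foldl (fun p c =>
      if pvGet grid r c == 5 then (PySem.Set.add p.1 r, PySem.Set.add p.2 c) else p) p)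
    (PySem.Set.empty, PySem.Set.empty)

def pvAr1 (grid : List (List Int)) : Int := (PySem.List.min? (pvFS grid).1 (fun x => x)).getD 0
def pvAr2 (grid : List (List Int)) : Int := (PySem.List.max? (pvFS grid).1 (fun x => x)).getD 0
def pvAc1 (grid : List (List Int)) : Int := (PySem.List.min? (pvFS grid).2 (fun x => x)).getD 0
def pvAc2 (grid : List (List Int)) : Int := (PySem.List.max? (pvFS grid).2 (fun x => x)).getD 0

def pvRes1 (grid : List (List Int)) : List (List Int) :=
  (PySem.List.pyRange (pvAr1 grid) (pvAr2 grid + 1) 1).foldl (fun m r =>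
    (PySem.List.pyRange (pvAc1 grid) (pvAc2 grid + 1) 1).foldl (fun m c => pvSet2 m r c) m) (pvZero grid)

def pvRes2 (grid : List (List Int)) : List (List Int) :=
  (PySem.List.pyRange (pvAr1 grid) (pvAr2 grid + 1) 1).foldl (fun m r =>
    (PySem.List.pyRange 0 (pvRowCnt grid r 0 (pvAc1 grid)) 1).foldl (fun m i =>
        if 0 ≤ pvAc1 grid - 1 - i ∧ pvAc1 grid - 1 - i < pvCn grid then pvSet2 m r (pvAc1 grid - 1 - i) else m) m
    |> (PySem.List.pyRange 0 (pvRowCnt grid r (pvAc2 grid + 1) (pvCn grid)) 1).foldl (fun m i =>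
        if 0 ≤ pvAc2 grid + 1 + i ∧ pvAc2 grid + 1 + i < pvCn grid then pvSet2 m r (pvAc2 grid + 1 + i) else m))
    (pvRes1 grid)

def pvRes3 (grid : List (List Int)) : List (List Int) :=
  (PySem.List.pyRange (pvAc1 grid) (pvAc2 grid + 1) 1).foldl (fun m c =>
    (PySem.List.pyRange 0 (pvColCnt grid c 0 (pvAr1 grid)) 1).foldl (fun m i =>
        if 0 ≤ pvAr1 grid - 1 - i ∧ pvAr1 grid - 1 - i < pvR grid then pvSet2 m (pvAr1 grid - 1 - i) c else m) m
    |> (PySem.List.pyRange 0 (pvColCnt grid c (pvAr2 grid + 1) (pvR grid)) 1).foldl (fun m i =>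
        if 0 ≤ pvAr2 grid + 1 + i ∧ pvAr2 grid + 1 + i < pvR grid then pvSet2 m (pvAr2 grid + 1 + i) c else m))
    (pvRes2 grid)

def pvFives (grid : List (List Int)) : List (Int × Int) :=
  (PySem.List.pyRange 0 (pvR grid) 1).foldl (fun acc r =>
    (PySem.List.pyRange 0 (pvCn grid) 1).foldl (fun acc c =>
      if pvGet grid r c == 5 then acc ++ [(r, c)] else acc) acc) []

def pvBr1 (grid : List (List Int)) : Int := (PySem.List.min? ((pvFives grid).map (·.1)) (fun x => x)).getD 0
def pvBr2 (grid : List (List Int)) : Int := (PySem.List.max? ((pvFives grid).map (·.1)) (fun x => x)).getD 0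
def pvBc1 (grid : List (List Int)) : Int := (PySem.List.min? ((pvFives grid).map (·.2)) (fun x => x)).getD 0
def pvBc2 (grid : List (List Int)) : Int := (PySem.List.max? ((pvFives grid).map (·.2)) (fun x => x)).getD 0

def pvBBody (grid : List (List Int)) : List (List Int) :=
  (PySem.List.pyRange 0 (pvR grid) 1).map (fun r =>
    (PySem.List.pyRange 0 (pvCn grid) 1).map (fun c =>
      pvCell (pvBr1 grid) (pvBr2 grid) (pvBc1 grid) (pvBc2 grid)
        ((PySem.List.pyRange 0 (pvR grid) 1).map (fun r => pvRowCnt grid r 0 (pvBc1 grid)))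
        ((PySem.List.pyRange 0 (pvR grid) 1).map (fun r => pvRowCnt grid r (pvBc2 grid + 1) (pvCn grid)))
        ((PySem.List.pyRange 0 (pvCn grid) 1).map (fun c => pvColCnt grid c 0 (pvBr1 grid)))
        ((PySem.List.pyRange 0 (pvCn grid) 1).map (fun c => pvColCnt grid c (pvBr2 grid + 1) (pvR grid))) r c))

theorem transform_unfold (grid : List (List Int)) :
    transform grid = if (pvFS grid).1 = [] then grid.map (fun row => row) else pvRes3 grid := rfl

theorem transform_alt_unfold (grid : List (List Int)) :
    transform_alt grid = if pvFives grid = [] then grid.map (fun row => row) else pvBBody grid := rfl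



-- painting: a fold of unconditional cell-sets
def pvPaint (m : List (List Int)) (ps : List (Int × Int)) : List (List Int) :=
  ps.foldl (fun m p => pvSet2 m p.1 p.2) m

def pvShape (Rn Cn : Nat) (m : List (List Int)) : Prop :=
  m.length = Rn ∧ ∀ row ∈ m, row.length = Cn

theorem pvPaint_append (m : List (List Int)) (xs ys : List (Int × Int)) :
    pvPaint m (xs ++ ys) = pvPaint (pvPaint m xs) ys := List.foldl_append ..

theorem pv_foldl_foldl {α β γ : Type} (l : List α) (h : α → List β) (f : γ → β → γ) (init : γ) :
    l.foldl (fun p x => (h x).foldl f p) init = (l.flatMap h).foldl f init := by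
  induction l generalizing init with
  | nil => rfl
  | cons a t ih => simp [List.foldl_append, ih]

theorem pv_foldl_set2_map {α : Type} (l : List α) (f g : α → Int) (m : List (List Int)) :
    l.foldl (fun m x => pvSet2 m (f x) (g x)) m = pvPaint m (l.map fun x => (f x, g x)) := by
  simp [pvPaint, List.foldl_map]

theorem pv_foldl_set2_guard {α : Type} (l : List α) (P : α → Prop) [DecidablePred P]
    (f g : α → Int) (m : List (List Int)) :
    l.foldl (fun m x => if P x then pvSet2 m (f x) (g x) else m) m
      = pvPaint m ((l.filter (fun x => decide (P x))).map fun x => (f x, g x)) := by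
  induction l generalizing m with
  | nil => rfl
  | cons a t ih =>
    by_cases h : P a <;> simp [h, ih, pvPaint]

theorem pv_foldl_paint_flatMap {α : Type} (l : List α) (h : α → List (Int × Int)) (m : List (List Int)) :
    l.foldl (fun m x => pvPaint m (h x)) m = pvPaint m (l.flatMap h) := by
  induction l generalizing m with
  | nil => rfl
  | cons a t ih => simp [List.flatMap_cons, pvPaint_append, ih]

theorem pvGetD_mem_or {α : Type} (xs : List α) (i : Int) (d : α) :
    PySem.List.pyGetD xs i d ∈ xs ∨ PySem.List.pyGetD xs i d = d := by
  simp only [PySem.List.pyGetD]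
  cases h : PySem.List.pyGet? xs i with
  | none => right; rfl
  | some a =>
    left
    simp only [Option.getD_some]
    simp only [PySem.List.pyGet?, PySem.List.pyIdx?] at h
    split at h <;> split at h <;>
      first
        | exact List.mem_of_getElem? h
        | simp at h
theorem pvSet2_shape (Rn Cn : Nat) (m : List (List Int)) (r c : Int)
    (hm : pvShape Rn Cn m) (hr0 : 0 ≤ r) (hrR : r < (Rn : Int)) :
    pvShape Rn Cn (pvSet2 m r c) := by
  obtain ⟨hlen, hrows⟩ := hm
  have hrn : r.toNat < m.length := by omega
  have hrow : PySem.List.pyGetD m r ([] : List Int) = m[r.toNat] :=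
    PySem.List.pyGetD_eq_getElem m [] hr0 (by omega)
  refine ⟨?_, ?_⟩
  · unfold pvSet2
    rw [PySem.List.pySetD_of_nonneg m _ hr0]
    simp [hlen]
  · intro row hmem
    unfold pvSet2 at hmem
    rw [PySem.List.pySetD_of_nonneg m _ hr0] at hmem
    rcases List.mem_or_eq_of_mem_set hmem with h | h
    · exact hrows _ h
    · subst h
      rw [PySem.List.length_pySetD, hrow]
      exact hrows _ (List.getElem_mem hrn)
theorem pvGet_set2 (Rn Cn : Nat) (m : List (List Int)) (r c : Int)
    (hm : pvShape Rn Cn m) (hr0 : 0 ≤ r) (hrR : r < (Rn : Int)) (hc0 : 0 ≤ c) (hcC : c < (Cn : Int))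
    (i j : Int) (hi0 : 0 ≤ i) (hj0 : 0 ≤ j) :
    pvGet (pvSet2 m r c) i j = if i = r ∧ j = c then 5 else pvGet m i j := by
  obtain ⟨hlen, hrows⟩ := hm
  have hrn : r.toNat < m.length := by omega
  have hrow : PySem.List.pyGetD m r ([] : List Int) = m[r.toNat] :=
    PySem.List.pyGetD_eq_getElem m [] hr0 (by omega)
  have hCrow : (m[r.toNat]).length = Cn := hrows _ (List.getElem_mem hrn)
  have hcn : c.toNat < (m[r.toNat]).length := by omega
  unfold pvSet2 pvGet
  rw [hrow]
  generalize hq : m[r.toNat] = row at hCrow hcn ⊢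
  have hr' : r = ((r.toNat : Nat) : Int) := by omega
  have hc' : c = ((c.toNat : Nat) : Int) := by omega
  have hi' : i = ((i.toNat : Nat) : Int) := by omega
  have hj' : j = ((j.toNat : Nat) : Int) := by omega
  rw [hr', hc', hi', hj']
  rw [PySem.List.pyGetD_pySetD_natCast m r.toNat i.toNat _ _ hrn]
  by_cases hi : i.toNat = r.toNat
  · rw [if_pos hi, PySem.List.pyGetD_pySetD_natCast row c.toNat j.toNat _ _ hcn]
    by_cases hj : j.toNat = c.toNat
    · rw [if_pos hj, if_pos (by constructor <;> omega)]
    · rw [if_neg hj, if_neg (by rintro ⟨h1, h2⟩; omega), hi, ← hr', hrow, hq]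
  · rw [if_neg hi, if_neg (by rintro ⟨h1, h2⟩; omega)]
theorem pvPaint_props (Rn Cn : Nat) (ps : List (Int × Int)) :
    ∀ m : List (List Int), pvShape Rn Cn m →
    (∀ p ∈ ps, 0 ≤ p.1 ∧ p.1 < (Rn : Int) ∧ 0 ≤ p.2 ∧ p.2 < (Cn : Int)) →
    pvShape Rn Cn (pvPaint m ps) ∧
      ∀ i j : Int, 0 ≤ i → 0 ≤ j → pvGet (pvPaint m ps) i j = if (i, j) ∈ ps then 5 else pvGet m i j := by
  induction ps with
  | nil => intro m hm _; exact ⟨hm, fun i j _ _ => by simp [pvPaint]⟩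
  | cons p t ih =>
    intro m hm hb
    have hp := hb p (List.mem_cons_self ..)
    have ht : ∀ q ∈ t, 0 ≤ q.1 ∧ q.1 < (Rn : Int) ∧ 0 ≤ q.2 ∧ q.2 < (Cn : Int) :=
      fun q hq => hb q (List.mem_cons_of_mem _ hq)
    have hm' : pvShape Rn Cn (pvSet2 m p.1 p.2) := pvSet2_shape Rn Cn m p.1 p.2 hm hp.1 hp.2.1
    have hstep : pvPaint m (p :: t) = pvPaint (pvSet2 m p.1 p.2) t := rfl
    obtain ⟨hsh, hget⟩ := ih (pvSet2 m p.1 p.2) hm' ht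
    refine ⟨by rw [hstep]; exact hsh, fun i j hi0 hj0 => ?_⟩
    rw [hstep, hget i j hi0 hj0, pvGet_set2 Rn Cn m p.1 p.2 hm hp.1 hp.2.1 hp.2.2.1 hp.2.2.2 i j hi0 hj0]
    by_cases h1 : (i, j) ∈ t <;> by_cases h2 : i = p.1 ∧ j = p.2 <;>
      simp [h1, h2, List.mem_cons, Prod.ext_iff]

theorem pvZero_shape (grid : List (List Int)) :
    pvShape grid.length (PySem.List.pyGetD grid 0 ([] : List Int)).length (pvZero grid) := by
  constructor
  · simp [pvZero, PySem.List.length_pyRange_one, pvR]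
  · intro row hrow
    simp only [pvZero, List.mem_map] at hrow
    obtain ⟨x, _, rfl⟩ := hrow
    simp [PySem.List.length_pyRange_one, pvCn]

theorem pyGetD_const_zero (l : List Int) (hl : ∀ v ∈ l, v = 0) (j : Int) :
    PySem.List.pyGetD l j 0 = 0 := by
  rcases pvGetD_mem_or l j 0 with h | h
  exacts [hl _ h, h]

theorem pvGet_zero (grid : List (List Int)) (i j : Int) : pvGet (pvZero grid) i j = 0 := by
  unfold pvGet
  rcases pvGetD_mem_or (pvZero grid) i ([] : List Int) with h | h
  · apply pyGetD_const_zero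
    intro v hv
    simp only [pvZero, List.mem_map] at h
    obtain ⟨x, -, hx⟩ := h
    simp only [pvZero] at hv
    rw [← hx] at hv
    simp only [List.mem_map] at hv
    obtain ⟨y, -, hy⟩ := hv
    omega
  · rw [h]
    exact pyGetD_const_zero [] (by simp) j


theorem pvFives_eq (grid : List (List Int)) :
    pvFives grid = (PySem.List.pyRange 0 (pvR grid)).flatMap (fun r =>
      ((PySem.List.pyRange 0 (pvCn grid)).filter (fun c => pvGet grid r c == 5)).map (fun c => (r, c))) := by
  unfold pvFives
  simp only [PySem.List.foldl_append_if]
  rw [PySem.List.foldl_append_eq_flatMap]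
  simp

theorem mem_pvFives (grid : List (List Int)) (x y : Int) :
    (x, y) ∈ pvFives grid ↔
      0 ≤ x ∧ x < pvR grid ∧ 0 ≤ y ∧ y < pvCn grid ∧ pvGet grid x y = 5 := by
  rw [pvFives_eq]
  simp only [List.mem_flatMap, List.mem_map, List.mem_filter, PySem.List.mem_pyRange_one,
    Prod.mk.injEq, beq_iff_eq]
  constructor
  · rintro ⟨a, ⟨h1, h2⟩, c, ⟨⟨h3, h4⟩, h5⟩, rfl, rfl⟩
    exact ⟨h1, h2, h3, h4, h5⟩
  · rintro ⟨h1, h2, h3, h4, h5⟩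
    exact ⟨x, ⟨h1, h2⟩, y, ⟨⟨h3, h4⟩, h5⟩, rfl, rfl⟩

theorem pvFS_eq (grid : List (List Int)) :
    pvFS grid = ((PySem.List.pyRange 0 (pvR grid)).flatMap (fun r =>
        (PySem.List.pyRange 0 (pvCn grid)).map (fun c => (r, c)))).foldl
      (fun p q => if pvGet grid q.1 q.2 == 5 then (PySem.Set.add p.1 q.1, PySem.Set.add p.2 q.2) else p)
      (PySem.Set.empty, PySem.Set.empty) := by
  unfold pvFS
  rw [← pv_foldl_foldl]
  simp only [List.foldl_map]

theorem mem_fsfold_fst (grid : List (List Int)) (L : List (Int × Int)) :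
    ∀ (p : PySem.Set Int × PySem.Set Int) (x : Int),
    (x ∈ (L.foldl (fun p q => if pvGet grid q.1 q.2 == 5 then
        (PySem.Set.add p.1 q.1, PySem.Set.add p.2 q.2) else p) p).1
      ↔ x ∈ p.1 ∨ ∃ q ∈ L, pvGet grid q.1 q.2 = 5 ∧ q.1 = x) := by
  induction L with
  | nil => intro p x; simp
  | cons a t ih =>
    intro p x
    by_cases h : pvGet grid a.1 a.2 = 5
    · simp only [List.foldl_cons, if_pos (show (pvGet grid a.1 a.2 == 5) = true by simpa using h)]
      rw [ih]
      simp only [PySem.Set.mem_add, List.mem_cons]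
      constructor
      · rintro (⟨hp | rfl⟩ | ⟨q, hq, h5, rfl⟩)
        · exact Or.inl hp
        · exact Or.inr ⟨a, Or.inl rfl, h, rfl⟩
        · exact Or.inr ⟨q, Or.inr hq, h5, rfl⟩
      · rintro (hp | ⟨q, (rfl | hq), h5, rfl⟩)
        · exact Or.inl (Or.inl hp)
        · exact Or.inl (Or.inr rfl)
        · exact Or.inr ⟨q, hq, h5, rfl⟩
    · simp only [List.foldl_cons, if_neg (show ¬ (pvGet grid a.1 a.2 == 5) = true by simpa using h)]
      rw [ih]
      simp only [List.mem_cons]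
      constructor
      · rintro (hp | ⟨q, hq, h5, rfl⟩)
        · exact Or.inl hp
        · exact Or.inr ⟨q, Or.inr hq, h5, rfl⟩
      · rintro (hp | ⟨q, (rfl | hq), h5, rfl⟩)
        · exact Or.inl hp
        · exact absurd h5 h
        · exact Or.inr ⟨q, hq, h5, rfl⟩

theorem mem_fsfold_snd (grid : List (List Int)) (L : List (Int × Int)) :
    ∀ (p : PySem.Set Int × PySem.Set Int) (y : Int),
    (y ∈ (L.foldl (fun p q => if pvGet grid q.1 q.2 == 5 then
        (PySem.Set.add p.1 q.1, PySem.Set.add p.2 q.2) else p) p).2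
      ↔ y ∈ p.2 ∨ ∃ q ∈ L, pvGet grid q.1 q.2 = 5 ∧ q.2 = y) := by
  induction L with
  | nil => intro p y; simp
  | cons a t ih =>
    intro p y
    by_cases h : pvGet grid a.1 a.2 = 5
    · simp only [List.foldl_cons, if_pos (show (pvGet grid a.1 a.2 == 5) = true by simpa using h)]
      rw [ih]
      simp only [PySem.Set.mem_add, List.mem_cons]
      constructor
      · rintro (⟨hp | rfl⟩ | ⟨q, hq, h5, rfl⟩)
        · exact Or.inl hp
        · exact Or.inr ⟨a, Or.inl rfl, h, rfl⟩
        · exact Or.inr ⟨q, Or.inr hq, h5, rfl⟩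
      · rintro (hp | ⟨q, (rfl | hq), h5, rfl⟩)
        · exact Or.inl (Or.inl hp)
        · exact Or.inl (Or.inr rfl)
        · exact Or.inr ⟨q, hq, h5, rfl⟩
    · simp only [List.foldl_cons, if_neg (show ¬ (pvGet grid a.1 a.2 == 5) = true by simpa using h)]
      rw [ih]
      simp only [List.mem_cons]
      constructor
      · rintro (hp | ⟨q, hq, h5, rfl⟩)
        · exact Or.inl hp
        · exact Or.inr ⟨q, Or.inr hq, h5, rfl⟩
      · rintro (hp | ⟨q, (rfl | hq), h5, rfl⟩)
        · exact Or.inl hp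
        · exact absurd h5 h
        · exact Or.inr ⟨q, hq, h5, rfl⟩

theorem mem_pvFS_fst (grid : List (List Int)) (x : Int) :
    x ∈ (pvFS grid).1 ↔ ∃ y, (x, y) ∈ pvFives grid := by
  rw [pvFS_eq, mem_fsfold_fst]
  simp only [PySem.Set.empty, List.not_mem_nil, false_or, List.mem_flatMap, List.mem_map,
    PySem.List.mem_pyRange_one]
  constructor
  · rintro ⟨q, ⟨a, ⟨h1, h2⟩, c, ⟨h3, h4⟩, rfl⟩, h5, rfl⟩
    exact ⟨c, (mem_pvFives ..).2 ⟨h1, h2, h3, h4, h5⟩⟩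
  · rintro ⟨y, hy⟩
    obtain ⟨h1, h2, h3, h4, h5⟩ := (mem_pvFives ..).1 hy
    exact ⟨(x, y), ⟨x, ⟨h1, h2⟩, y, ⟨h3, h4⟩, rfl⟩, h5, rfl⟩

theorem mem_pvFS_snd (grid : List (List Int)) (y : Int) :
    y ∈ (pvFS grid).2 ↔ ∃ x, (x, y) ∈ pvFives grid := by
  rw [pvFS_eq, mem_fsfold_snd]
  simp only [PySem.Set.empty, List.not_mem_nil, false_or, List.mem_flatMap, List.mem_map,
    PySem.List.mem_pyRange_one]
  constructor
  · rintro ⟨q, ⟨a, ⟨h1, h2⟩, c, ⟨h3, h4⟩, rfl⟩, h5, rfl⟩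
    exact ⟨a, (mem_pvFives ..).2 ⟨h1, h2, h3, h4, h5⟩⟩
  · rintro ⟨x, hy⟩
    obtain ⟨h1, h2, h3, h4, h5⟩ := (mem_pvFives ..).1 hy
    exact ⟨(x, y), ⟨x, ⟨h1, h2⟩, y, ⟨h3, h4⟩, rfl⟩, h5, rfl⟩

theorem pvFS_empty_iff (grid : List (List Int)) :
    (pvFS grid).1 = [] ↔ pvFives grid = [] := by
  rw [List.eq_nil_iff_forall_not_mem, List.eq_nil_iff_forall_not_mem]
  constructor
  · intro h q hq
    exact h q.1 ((mem_pvFS_fst ..).2 ⟨q.2, hq⟩)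
  · intro h x hx
    obtain ⟨y, hy⟩ := (mem_pvFS_fst ..).1 hx
    exact h _ hy


theorem pv_min?_congr (xs ys : List Int) (hy : ys ≠ []) (h : ∀ a : Int, a ∈ xs ↔ a ∈ ys) :
    PySem.List.min? xs (fun x => x) = PySem.List.min? ys (fun x => x) := by
  obtain ⟨b, hb⟩ := List.exists_mem_of_ne_nil ys hy
  have hx : xs ≠ [] := by intro hxe; rw [hxe] at h; simpa using (h b).2 hb
  cases hxm : PySem.List.min? xs (fun x => x) with
  | none => exact absurd ((PySem.List.min?_eq_none_iff xs _).1 hxm) hx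
  | some mx =>
    cases hym : PySem.List.min? ys (fun x => x) with
    | none => exact absurd ((PySem.List.min?_eq_none_iff ys _).1 hym) hy
    | some my =>
      have h1 := PySem.List.min?_isMin hxm my ((h my).2 (PySem.List.min?_mem hym))
      have h2 := PySem.List.min?_isMin hym mx ((h mx).1 (PySem.List.min?_mem hxm))
      exact congrArg some (le_antisymm h1 h2)

theorem pv_max?_congr (xs ys : List Int) (hy : ys ≠ []) (h : ∀ a : Int, a ∈ xs ↔ a ∈ ys) :
    PySem.List.max? xs (fun x => x) = PySem.List.max? ys (fun x => x) := by
  obtain ⟨b, hb⟩ := List.exists_mem_of_ne_nil ys hy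
  have hx : xs ≠ [] := by intro hxe; rw [hxe] at h; simpa using (h b).2 hb
  cases hxm : PySem.List.max? xs (fun x => x) with
  | none => exact absurd ((PySem.List.max?_eq_none_iff xs _).1 hxm) hx
  | some mx =>
    cases hym : PySem.List.max? ys (fun x => x) with
    | none => exact absurd ((PySem.List.max?_eq_none_iff ys _).1 hym) hy
    | some my =>
      have h1 := PySem.List.max?_isMax hxm my ((h my).2 (PySem.List.max?_mem hym))
      have h2 := PySem.List.max?_isMax hym mx ((h mx).1 (PySem.List.max?_mem hxm))
      exact congrArg some (le_antisymm h2 h1)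

theorem pv_mem_fst_iff (grid : List (List Int)) (a : Int) :
    a ∈ (pvFS grid).1 ↔ a ∈ (pvFives grid).map (·.1) := by
  rw [mem_pvFS_fst]
  simp only [List.mem_map]
  constructor
  · rintro ⟨y, hy⟩; exact ⟨(a, y), hy, rfl⟩
  · rintro ⟨q, hq, rfl⟩; exact ⟨q.2, by simpa using hq⟩

theorem pv_mem_snd_iff (grid : List (List Int)) (a : Int) :
    a ∈ (pvFS grid).2 ↔ a ∈ (pvFives grid).map (·.2) := by
  rw [mem_pvFS_snd]
  simp only [List.mem_map]
  constructor
  · rintro ⟨x, hx⟩; exact ⟨(x, a), hx, rfl⟩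
  · rintro ⟨q, hq, rfl⟩; exact ⟨q.1, by simpa using hq⟩

theorem pv_box_eq (grid : List (List Int)) (h5 : pvFives grid ≠ []) :
    pvAr1 grid = pvBr1 grid ∧ pvAr2 grid = pvBr2 grid ∧
    pvAc1 grid = pvBc1 grid ∧ pvAc2 grid = pvBc2 grid := by
  have hy1 : (pvFives grid).map (·.1) ≠ [] := by simpa using h5
  have hy2 : (pvFives grid).map (·.2) ≠ [] := by simpa using h5
  refine ⟨?_, ?_, ?_, ?_⟩
  · unfold pvAr1 pvBr1; rw [pv_min?_congr _ _ hy1 (pv_mem_fst_iff grid)]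
  · unfold pvAr2 pvBr2; rw [pv_max?_congr _ _ hy1 (pv_mem_fst_iff grid)]
  · unfold pvAc1 pvBc1; rw [pv_min?_congr _ _ hy2 (pv_mem_snd_iff grid)]
  · unfold pvAc2 pvBc2; rw [pv_max?_congr _ _ hy2 (pv_mem_snd_iff grid)]

theorem pv_box_bounds (grid : List (List Int)) (h5 : pvFives grid ≠ []) :
    0 ≤ pvAr1 grid ∧ pvAr1 grid ≤ pvAr2 grid ∧ pvAr2 grid < pvR grid ∧
    0 ≤ pvAc1 grid ∧ pvAc1 grid ≤ pvAc2 grid ∧ pvAc2 grid < pvCn grid := by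
  have hx1 : (pvFS grid).1 ≠ [] := by
    intro h; exact h5 ((pvFS_empty_iff grid).1 h)
  obtain ⟨q, hq⟩ := List.exists_mem_of_ne_nil _ h5
  have hx2 : (pvFS grid).2 ≠ [] := by
    intro h
    rw [List.eq_nil_iff_forall_not_mem] at h
    exact h q.2 ((mem_pvFS_snd ..).2 ⟨q.1, by simpa using hq⟩)
  cases hm1 : PySem.List.min? (pvFS grid).1 (fun x => x) with
  | none => exact absurd ((PySem.List.min?_eq_none_iff _ _).1 hm1) hx1
  | some m1 =>
  cases hm2 : PySem.List.max? (pvFS grid).1 (fun x => x) with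
  | none => exact absurd ((PySem.List.max?_eq_none_iff _ _).1 hm2) hx1
  | some m2 =>
  cases hn1 : PySem.List.min? (pvFS grid).2 (fun x => x) with
  | none => exact absurd ((PySem.List.min?_eq_none_iff _ _).1 hn1) hx2
  | some n1 =>
  cases hn2 : PySem.List.max? (pvFS grid).2 (fun x => x) with
  | none => exact absurd ((PySem.List.max?_eq_none_iff _ _).1 hn2) hx2
  | some n2 =>
  have hm1m := PySem.List.min?_mem hm1
  have hm2m := PySem.List.max?_mem hm2
  have hn1m := PySem.List.min?_mem hn1
  have hn2m := PySem.List.max?_mem hn2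
  obtain ⟨y1, hy1⟩ := (mem_pvFS_fst ..).1 hm1m
  obtain ⟨y2, hy2⟩ := (mem_pvFS_fst ..).1 hm2m
  obtain ⟨x1, hx1m⟩ := (mem_pvFS_snd ..).1 hn1m
  obtain ⟨x2, hx2m⟩ := (mem_pvFS_snd ..).1 hn2m
  obtain ⟨hb1, hb2, -, -, -⟩ := (mem_pvFives ..).1 hy1
  obtain ⟨-, hb4, -, -, -⟩ := (mem_pvFives ..).1 hy2
  obtain ⟨-, -, hb5, -, -⟩ := (mem_pvFives ..).1 hx1m
  obtain ⟨-, -, -, hb8, -⟩ := (mem_pvFives ..).1 hx2m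
  have h12 := PySem.List.min?_isMin hm1 m2 hm2m
  have h34 := PySem.List.min?_isMin hn1 n2 hn2m
  unfold pvAr1 pvAr2 pvAc1 pvAc2
  rw [hm1, hm2, hn1, hn2]
  simp only [Option.getD_some]
  exact ⟨hb1, h12, hb4, hb5, h34, hb8⟩

theorem pv_foldl_count_le {α : Type} (p : α → Bool) (l : List α) :
    ∀ acc : Int, acc ≤ l.foldl (fun a x => if p x then a + 1 else a) acc := by
  induction l with
  | nil => intro acc; exact le_refl _
  | cons x t ih =>
    intro acc
    by_cases h : p x <;> simp only [List.foldl_cons, h, if_true]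
    · exact le_trans (by omega) (ih (acc + 1))
    · exact ih acc

theorem pvRowCnt_nonneg (grid : List (List Int)) (r a b : Int) : 0 ≤ pvRowCnt grid r a b :=
  pv_foldl_count_le _ _ 0

theorem pvColCnt_nonneg (grid : List (List Int)) (c a b : Int) : 0 ≤ pvColCnt grid c a b :=
  pv_foldl_count_le _ _ 0


-- the painted-position lists of A's three passes
def pvP1 (grid : List (List Int)) : List (Int × Int) :=
  (PySem.List.pyRange (pvAr1 grid) (pvAr2 grid + 1) 1).flatMap (fun r =>
    (PySem.List.pyRange (pvAc1 grid) (pvAc2 grid + 1) 1).map (fun c => (r, c)))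

def pvP2 (grid : List (List Int)) : List (Int × Int) :=
  (PySem.List.pyRange (pvAr1 grid) (pvAr2 grid + 1) 1).flatMap (fun r =>
    ((PySem.List.pyRange 0 (pvRowCnt grid r 0 (pvAc1 grid)) 1).filter
        (fun i => decide (0 ≤ pvAc1 grid - 1 - i ∧ pvAc1 grid - 1 - i < pvCn grid))).map
      (fun i => (r, pvAc1 grid - 1 - i))
    ++ ((PySem.List.pyRange 0 (pvRowCnt grid r (pvAc2 grid + 1) (pvCn grid)) 1).filter
        (fun i => decide (0 ≤ pvAc2 grid + 1 + i ∧ pvAc2 grid + 1 + i < pvCn grid))).map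
      (fun i => (r, pvAc2 grid + 1 + i)))

def pvP3 (grid : List (List Int)) : List (Int × Int) :=
  (PySem.List.pyRange (pvAc1 grid) (pvAc2 grid + 1) 1).flatMap (fun c =>
    ((PySem.List.pyRange 0 (pvColCnt grid c 0 (pvAr1 grid)) 1).filter
        (fun i => decide (0 ≤ pvAr1 grid - 1 - i ∧ pvAr1 grid - 1 - i < pvR grid))).map
      (fun i => (pvAr1 grid - 1 - i, c))
    ++ ((PySem.List.pyRange 0 (pvColCnt grid c (pvAr2 grid + 1) (pvR grid)) 1).filter
        (fun i => decide (0 ≤ pvAr2 grid + 1 + i ∧ pvAr2 grid + 1 + i < pvR grid))).map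
      (fun i => (pvAr2 grid + 1 + i, c)))

theorem pvRes1_eq (grid : List (List Int)) : pvRes1 grid = pvPaint (pvZero grid) (pvP1 grid) := by
  unfold pvRes1 pvP1
  simp only [pv_foldl_set2_map]
  rw [pv_foldl_paint_flatMap]

theorem pvRes2_eq (grid : List (List Int)) : pvRes2 grid = pvPaint (pvRes1 grid) (pvP2 grid) := by
  unfold pvRes2 pvP2
  simp only [pv_foldl_set2_guard]
  simp only [← pvPaint_append]
  rw [pv_foldl_paint_flatMap]

theorem pvRes3_eq (grid : List (List Int)) : pvRes3 grid = pvPaint (pvRes2 grid) (pvP3 grid) := by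
  unfold pvRes3 pvP3
  simp only [pv_foldl_set2_guard]
  simp only [← pvPaint_append]
  rw [pv_foldl_paint_flatMap]


theorem mem_pvP1 (grid : List (List Int)) (x y : Int) :
    (x, y) ∈ pvP1 grid ↔
      pvAr1 grid ≤ x ∧ x ≤ pvAr2 grid ∧ pvAc1 grid ≤ y ∧ y ≤ pvAc2 grid := by
  simp only [pvP1, List.mem_flatMap, List.mem_map, PySem.List.mem_pyRange_one, Prod.mk.injEq]
  constructor
  · rintro ⟨r, ⟨h1, h2⟩, c, ⟨h3, h4⟩, rfl, rfl⟩
    exact ⟨h1, by omega, h3, by omega⟩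
  · rintro ⟨h1, h2, h3, h4⟩
    exact ⟨x, ⟨h1, by omega⟩, y, ⟨h3, by omega⟩, rfl, rfl⟩

theorem mem_pvP2 (grid : List (List Int)) (x y : Int) :
    (x, y) ∈ pvP2 grid ↔
      pvAr1 grid ≤ x ∧ x ≤ pvAr2 grid ∧
        ((0 ≤ y ∧ y < pvCn grid ∧ pvAc1 grid - pvRowCnt grid x 0 (pvAc1 grid) ≤ y ∧ y < pvAc1 grid) ∨
         (0 ≤ y ∧ y < pvCn grid ∧ pvAc2 grid < y ∧
            y ≤ pvAc2 grid + pvRowCnt grid x (pvAc2 grid + 1) (pvCn grid))) := by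
  simp only [pvP2, List.mem_flatMap, List.mem_append, List.mem_map, List.mem_filter,
    PySem.List.mem_pyRange_one, Prod.mk.injEq, decide_eq_true_eq]
  constructor
  · rintro ⟨r, ⟨h1, h2⟩, ⟨i, ⟨⟨hi1, hi2⟩, hf1, hf2⟩, rfl, rfl⟩ | ⟨i, ⟨⟨hi1, hi2⟩, hf1, hf2⟩, rfl, rfl⟩⟩
    · exact ⟨h1, by omega, Or.inl ⟨by omega, by omega, by omega, by omega⟩⟩
    · exact ⟨h1, by omega, Or.inr ⟨by omega, by omega, by omega, by omega⟩⟩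
  · rintro ⟨h1, h2, ⟨hy0, hyC, hl, hr⟩ | ⟨hy0, hyC, hl, hr⟩⟩
    · exact ⟨x, ⟨h1, by omega⟩, Or.inl ⟨pvAc1 grid - 1 - y, ⟨⟨by omega, by omega⟩, by omega, by omega⟩, rfl, by omega⟩⟩
    · exact ⟨x, ⟨h1, by omega⟩, Or.inr ⟨y - pvAc2 grid - 1, ⟨⟨by omega, by omega⟩, by omega, by omega⟩, rfl, by omega⟩⟩

theorem mem_pvP3 (grid : List (List Int)) (x y : Int) :
    (x, y) ∈ pvP3 grid ↔
      pvAc1 grid ≤ y ∧ y ≤ pvAc2 grid ∧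
        ((0 ≤ x ∧ x < pvR grid ∧ pvAr1 grid - pvColCnt grid y 0 (pvAr1 grid) ≤ x ∧ x < pvAr1 grid) ∨
         (0 ≤ x ∧ x < pvR grid ∧ pvAr2 grid < x ∧
            x ≤ pvAr2 grid + pvColCnt grid y (pvAr2 grid + 1) (pvR grid))) := by
  simp only [pvP3, List.mem_flatMap, List.mem_append, List.mem_map, List.mem_filter,
    PySem.List.mem_pyRange_one, Prod.mk.injEq, decide_eq_true_eq]
  constructor
  · rintro ⟨c, ⟨h1, h2⟩, ⟨i, ⟨⟨hi1, hi2⟩, hf1, hf2⟩, rfl, rfl⟩ | ⟨i, ⟨⟨hi1, hi2⟩, hf1, hf2⟩, rfl, rfl⟩⟩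
    · exact ⟨h1, by omega, Or.inl ⟨by omega, by omega, by omega, by omega⟩⟩
    · exact ⟨h1, by omega, Or.inr ⟨by omega, by omega, by omega, by omega⟩⟩
  · rintro ⟨h1, h2, ⟨hx0, hxR, hl, hr⟩ | ⟨hx0, hxR, hl, hr⟩⟩
    · exact ⟨y, ⟨h1, by omega⟩, Or.inl ⟨pvAr1 grid - 1 - x, ⟨⟨by omega, by omega⟩, by omega, by omega⟩, by omega, rfl⟩⟩
    · exact ⟨y, ⟨h1, by omega⟩, Or.inr ⟨x - pvAr2 grid - 1, ⟨⟨by omega, by omega⟩, by omega, by omega⟩, by omega, rfl⟩⟩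

theorem pvP_bounds (grid : List (List Int)) (h5 : pvFives grid ≠ []) :
    ∀ p ∈ pvP1 grid ++ pvP2 grid ++ pvP3 grid,
      0 ≤ p.1 ∧ p.1 < (grid.length : Int) ∧ 0 ≤ p.2 ∧
        p.2 < ((PySem.List.pyGetD grid 0 ([] : List Int)).length : Int) := by
  obtain ⟨hb1, hb2, hb3, hb4, hb5, hb6⟩ := pv_box_bounds grid h5
  have hR : pvR grid = (grid.length : Int) := rfl
  have hC : pvCn grid = ((PySem.List.pyGetD grid 0 ([] : List Int)).length : Int) := rfl
  intro p hp
  rcases List.mem_append.1 hp with hp' | hp3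
  · rcases List.mem_append.1 hp' with hp1 | hp2
    · obtain ⟨k1, k2, k3, k4⟩ := (mem_pvP1 grid p.1 p.2).1 (by simpa using hp1)
      refine ⟨by omega, by rw [← hR]; omega, by omega, by rw [← hC]; omega⟩
    · obtain ⟨k1, k2, k3⟩ := (mem_pvP2 grid p.1 p.2).1 (by simpa using hp2)
      rcases k3 with ⟨k4, k5, k6, k7⟩ | ⟨k4, k5, k6, k7⟩ <;>
        refine ⟨by omega, by rw [← hR]; omega, by omega, by rw [← hC]; omega⟩
  · obtain ⟨k1, k2, k3⟩ := (mem_pvP3 grid p.1 p.2).1 (by simpa using hp3)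
    rcases k3 with ⟨k4, k5, k6, k7⟩ | ⟨k4, k5, k6, k7⟩ <;>
      refine ⟨by omega, by rw [← hR]; omega, by omega, by rw [← hC]; omega⟩


theorem pvGet_eq_getElem (m : List (List Int)) (i j : Nat)
    (hi : i < m.length) (hj : j < (m[i]).length) :
    pvGet m (i : Int) (j : Int) = m[i][j] := by
  unfold pvGet
  rw [PySem.List.pyGetD_natCast m i [], List.getD_eq_getElem _ _ hi,
    PySem.List.pyGetD_natCast _ j 0, List.getD_eq_getElem _ _ hj]

theorem pvBBody_length (grid : List (List Int)) : (pvBBody grid).length = grid.length := by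
  simp [pvBBody, PySem.List.length_pyRange_one, pvR]

theorem pvBBody_row_length (grid : List (List Int)) (row : List Int) (hrow : row ∈ pvBBody grid) :
    row.length = (PySem.List.pyGetD grid 0 ([] : List Int)).length := by
  simp only [pvBBody, List.mem_map] at hrow
  obtain ⟨r, -, rfl⟩ := hrow
  simp [PySem.List.length_pyRange_one, pvCn]

theorem pvGet_pvBBody (grid : List (List Int)) (i j : Int)
    (hi0 : 0 ≤ i) (hiR : i < pvR grid) (hj0 : 0 ≤ j) (hjC : j < pvCn grid) :
    pvGet (pvBBody grid) i j =
      (if pvBr1 grid ≤ i ∧ i ≤ pvBr2 grid ∧ pvBc1 grid ≤ j ∧ j ≤ pvBc2 grid then 5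
      else if pvBr1 grid ≤ i ∧ i ≤ pvBr2 grid ∧ j < pvBc1 grid ∧
          pvBc1 grid - pvRowCnt grid i 0 (pvBc1 grid) ≤ j then 5
      else if pvBr1 grid ≤ i ∧ i ≤ pvBr2 grid ∧ pvBc2 grid < j ∧
          j ≤ pvBc2 grid + pvRowCnt grid i (pvBc2 grid + 1) (pvCn grid) then 5
      else if pvBc1 grid ≤ j ∧ j ≤ pvBc2 grid ∧ i < pvBr1 grid ∧
          pvBr1 grid - pvColCnt grid j 0 (pvBr1 grid) ≤ i then 5
      else if pvBc1 grid ≤ j ∧ j ≤ pvBc2 grid ∧ pvBr2 grid < i ∧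
          i ≤ pvBr2 grid + pvColCnt grid j (pvBr2 grid + 1) (pvR grid) then 5
      else 0) := by
  unfold pvBBody pvGet
  rw [PySem.List.pyGetD_map_pyRange_of_nonneg _ _ _ _ hi0 hiR,
    PySem.List.pyGetD_map_pyRange_of_nonneg _ _ _ _ hj0 hjC]
  unfold pvCell
  simp only [PySem.List.pyGetD_map_pyRange_of_nonneg _ _ _ _ hi0 hiR,
    PySem.List.pyGetD_map_pyRange_of_nonneg _ _ _ _ hj0 hjC]

theorem transform_eq_alt (grid : List (List Int)) : transform grid = transform_alt grid := by
  rw [transform_unfold, transform_alt_unfold]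
  by_cases hE : pvFives grid = []
  · rw [if_pos ((pvFS_empty_iff grid).2 hE), if_pos hE]
  · rw [if_neg (fun h => hE ((pvFS_empty_iff grid).1 h)), if_neg hE]
    obtain ⟨e1, e2, e3, e4⟩ := pv_box_eq grid hE
    obtain ⟨hb1, hb2, hb3, hb4, hb5, hb6⟩ := pv_box_bounds grid hE
    have hR' : pvR grid = (grid.length : Int) := rfl
    have hC' : pvCn grid = ((PySem.List.pyGetD grid 0 ([] : List Int)).length : Int) := rfl
    have hz := pvZero_shape grid
    have hbounds := pvP_bounds grid hE
    have hAeq : pvRes3 grid = pvPaint (pvZero grid) (pvP1 grid ++ pvP2 grid ++ pvP3 grid) := by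
      rw [pvRes3_eq, pvRes2_eq, pvRes1_eq, pvPaint_append, pvPaint_append]
    obtain ⟨hAshape, hAget⟩ :=
      pvPaint_props grid.length (PySem.List.pyGetD grid 0 ([] : List Int)).length
        (pvP1 grid ++ pvP2 grid ++ pvP3 grid) (pvZero grid) hz hbounds
    rw [hAeq]
    apply List.ext_getElem
    · rw [hAshape.1, pvBBody_length]
    · intro i h1 h2
      apply List.ext_getElem
      · rw [hAshape.2 _ (List.getElem_mem h1), pvBBody_row_length grid _ (List.getElem_mem h2)]
      · intro j hj1 hj2
        have hiR : i < grid.length := by rw [← hAshape.1]; exact h1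
        have hjC : j < (PySem.List.pyGetD grid 0 ([] : List Int)).length := by
          rw [← hAshape.2 _ (List.getElem_mem h1)]; exact hj1
        rw [← pvGet_eq_getElem _ i j h1 hj1, ← pvGet_eq_getElem _ i j h2 hj2]
        rw [hAget (i : Int) (j : Int) (by omega) (by omega), pvGet_zero]
        rw [pvGet_pvBBody grid (i : Int) (j : Int) (by omega) (by rw [hR']; exact_mod_cast hiR)
          (by omega) (by rw [hC']; exact_mod_cast hjC)]
        rw [← e1, ← e2, ← e3, ← e4]
        have ha1 := pvRowCnt_nonneg grid (i : Int) 0 (pvAc1 grid)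
        have ha2 := pvRowCnt_nonneg grid (i : Int) (pvAc2 grid + 1) (pvCn grid)
        have ha3 := pvColCnt_nonneg grid (j : Int) 0 (pvAr1 grid)
        have ha4 := pvColCnt_nonneg grid (j : Int) (pvAr2 grid + 1) (pvR grid)
        have hiR' : (i : Int) < pvR grid := by rw [hR']; exact_mod_cast hiR
        have hjC' : (j : Int) < pvCn grid := by rw [hC']; exact_mod_cast hjC
        simp only [List.mem_append, mem_pvP1, mem_pvP2, mem_pvP3]
        rw [hR'] at hb3 hiR' ha4
        rw [hC'] at hb6 hjC' ha2
        rw [hR', hC']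
        split_ifs <;> omega

-- ===== VERDICT (by name: the statement is the Claim_ definition above) =====
theorem transform_spec : Claim_equal_transform := by
  intro grid _ _
  unfold Spec_transform
  exact transform_eq_alt grid
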